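-- pv_equiv track=rewrite | github.com/michalhron/AI-futures | dashboard/data_utils.py | compatible_archetypes_for_visions_union
-- ===== SOURCE A (Python) =====
-- V2A_STANCED: dict[tuple[str, str], str] = {
--     ("Open Horizons, Unstable Ground", "Opening"): "Pioneer",
--     ("Open Horizons, Unstable Ground", "Mobilizing"): "Pioneer",
--     ("Open Horizons, Unstable Ground", "Normalizing"): "Pioneer",
--     ("Open Horizons, Unstable Ground", "Controlling"): "Guardian",
--     ("Empowered but Exposed", "Opening"): "Pioneer",
--     ("Empowered but Exposed", "Mobilizing"): "Builder",
--     ("Empowered but Exposed", "Normalizing"): "Guardian",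
--     ("Empowered but Exposed", "Controlling"): "Guardian",
--     ("Seamless but Concentrated", "Opening"): "Pioneer",
--     ("Seamless but Concentrated", "Mobilizing"): "Builder",
--     ("Seamless but Concentrated", "Normalizing"): "Pioneer",
--     ("Seamless but Concentrated", "Controlling"): "Guardian",
--     ("Transformed or Left Behind", "Opening"): "Pioneer",
--     ("Transformed or Left Behind", "Mobilizing"): "Builder",
--     ("Transformed or Left Behind", "Normalizing"): "Pioneer",
--     ("Transformed or Left Behind", "Controlling"): "Guardian",
--     ("Guided but Fragile", "Opening"): "Pioneer",
--     ("Guided but Fragile", "Mobilizing"): "Guardian",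
--     ("Guided but Fragile", "Normalizing"): "Guardian",
--     ("Guided but Fragile", "Controlling"): "Guardian",
-- }
--
-- def compatible_archetypes_for_visions_union(visions: list[str]) -> set[str] | None:
--     """Union of archetypes that appear in the table for any of the given visions."""
--     if not visions:
--         return None
--     out: set[str] = set()
--     for (v, _s), arch in V2A_STANCED.items():
--         if v in visions:
--             out.add(arch)
--     return out if out else None
-- ===== SOURCE B (Python) =====
-- # B: no scan over the (vision, stance) table at call time -- the presence of the
-- # five known visions in the input is encoded as a tuple of five booleans (five
-- # membership tests against a set of the input), which indexes a table of all 32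
-- # possible answers precomputed at import time.
--
-- _VISION_ARCHS = (
--     ("Open Horizons, Unstable Ground", ("Pioneer", "Guardian")),
--     ("Empowered but Exposed", ("Pioneer", "Builder", "Guardian")),
--     ("Seamless but Concentrated", ("Pioneer", "Builder", "Guardian")),
--     ("Transformed or Left Behind", ("Pioneer", "Builder", "Guardian")),
--     ("Guided but Fragile", ("Pioneer", "Guardian")),
-- )
--
-- def _union_for(bits):
--     out = set()
--     for (_v, archs), b in zip(_VISION_ARCHS, bits):
--         if b:
--             out.update(archs)
--     return out
--
-- _BITS = [(b1, b2, b3, b4, b5)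
--          for b1 in (False, True) for b2 in (False, True) for b3 in (False, True)
--          for b4 in (False, True) for b5 in (False, True)]
-- _ANSWERS = {bits: _union_for(bits) for bits in _BITS}
--
-- def compatible_archetypes_for_visions_union(visions: list) -> set | None:
--     """Union of archetypes that appear in the table for any of the given visions."""
--     if not visions:
--         return None
--     w = set(visions)
--     bits = ("Open Horizons, Unstable Ground" in w,
--             "Empowered but Exposed" in w,
--             "Seamless but Concentrated" in w,
--             "Transformed or Left Behind" in w,
--             "Guided but Fragile" in w)
--     out = set(_ANSWERS[bits])
--     return out or None
-- ===== Notes on version B (the rewrite author's own statement) =====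
-- stated objective: faster
-- what changed: Instead of scanning all 20 (vision, stance) rows and testing each vision against the input list, B precomputes at import time a table of all 32 possible unions indexed by which of the five known visions are present, and the function does one pass to build a set of the input, five O(1) membership tests forming the 5-bit presence pattern, and a single table lookup.
import Mathlib
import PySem

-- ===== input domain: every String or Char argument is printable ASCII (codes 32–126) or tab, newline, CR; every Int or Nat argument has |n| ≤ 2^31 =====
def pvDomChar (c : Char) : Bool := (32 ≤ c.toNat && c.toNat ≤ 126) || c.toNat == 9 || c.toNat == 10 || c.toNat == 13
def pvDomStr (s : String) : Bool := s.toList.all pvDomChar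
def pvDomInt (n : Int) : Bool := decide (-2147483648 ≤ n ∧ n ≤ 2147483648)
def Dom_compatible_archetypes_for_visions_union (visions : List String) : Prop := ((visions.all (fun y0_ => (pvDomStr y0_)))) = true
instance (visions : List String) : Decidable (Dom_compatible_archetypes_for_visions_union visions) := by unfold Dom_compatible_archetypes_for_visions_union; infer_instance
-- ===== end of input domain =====

-- B does no scan over the 20-row table at call time: it encodes which of the five known
-- visions are present as a tuple of five booleans and looks the answer up in a table of
-- all 32 possible unions precomputed at module load.

-- ===== PORT A =====
-- the module-level table V2A_STANCED, in declaration order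
def v2aStanced : List ((String × String) × String) := [
  (("Open Horizons, Unstable Ground", "Opening"), "Pioneer"),
  (("Open Horizons, Unstable Ground", "Mobilizing"), "Pioneer"),
  (("Open Horizons, Unstable Ground", "Normalizing"), "Pioneer"),
  (("Open Horizons, Unstable Ground", "Controlling"), "Guardian"),
  (("Empowered but Exposed", "Opening"), "Pioneer"),
  (("Empowered but Exposed", "Mobilizing"), "Builder"),
  (("Empowered but Exposed", "Normalizing"), "Guardian"),
  (("Empowered but Exposed", "Controlling"), "Guardian"),
  (("Seamless but Concentrated", "Opening"), "Pioneer"),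
  (("Seamless but Concentrated", "Mobilizing"), "Builder"),
  (("Seamless but Concentrated", "Normalizing"), "Pioneer"),
  (("Seamless but Concentrated", "Controlling"), "Guardian"),
  (("Transformed or Left Behind", "Opening"), "Pioneer"),
  (("Transformed or Left Behind", "Mobilizing"), "Builder"),
  (("Transformed or Left Behind", "Normalizing"), "Pioneer"),
  (("Transformed or Left Behind", "Controlling"), "Guardian"),
  (("Guided but Fragile", "Opening"), "Pioneer"),
  (("Guided but Fragile", "Mobilizing"), "Guardian"),
  (("Guided but Fragile", "Normalizing"), "Guardian"),
  (("Guided but Fragile", "Controlling"), "Guardian")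
]

def compatible_archetypes_for_visions_union (visions : List String) : Option (List String) :=
  if visions = [] then none
  else
    let out : PySem.Set String :=
      v2aStanced.foldl (fun out p => if visions.contains p.1.1 then PySem.Set.add out p.2 else out) PySem.Set.empty
    if out = [] then none else some out

-- ===== PORT B =====
-- the module-level tuple _VISION_ARCHS
def visionArchs : List (String × List String) := [
  ("Open Horizons, Unstable Ground", ["Pioneer", "Guardian"]),
  ("Empowered but Exposed", ["Pioneer", "Builder", "Guardian"]),
  ("Seamless but Concentrated", ["Pioneer", "Builder", "Guardian"]),
  ("Transformed or Left Behind", ["Pioneer", "Builder", "Guardian"]),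
  ("Guided but Fragile", ["Pioneer", "Guardian"])
]

-- _union_for(bits): 'zip(_VISION_ARCHS, bits)' with bits a 5-tuple is ported by listing
-- the five components of the tuple (fixed arity), exact.
def unionFor (bits : Bool × Bool × Bool × Bool × Bool) : PySem.Set String :=
  ((visionArchs.map (·.2)).zip [bits.1, bits.2.1, bits.2.2.1, bits.2.2.2.1, bits.2.2.2.2]).foldl
    (fun out p => if p.2 then PySem.Set.update out p.1 else out) PySem.Set.empty

-- _BITS: the nested comprehension over (False, True)
def bitsList : List (Bool × Bool × Bool × Bool × Bool) :=
  [false, true].flatMap (fun b1 =>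
    [false, true].flatMap (fun b2 =>
      [false, true].flatMap (fun b3 =>
        [false, true].flatMap (fun b4 =>
          [false, true].map (fun b5 => (b1, b2, b3, b4, b5))))))

-- _ANSWERS = {bits: _union_for(bits) for bits in _BITS}
def answersD : PySem.Dict (Bool × Bool × Bool × Bool × Bool) (List String) :=
  bitsList.foldl (fun d bits => PySem.Dict.insert d bits (unionFor bits)) PySem.Dict.empty

def compatible_archetypes_for_visions_union_alt (visions : List String) : Option (List String) :=
  if visions = [] then none
  else
    let w : PySem.Set String := PySem.Set.ofList visions
    let bits : Bool × Bool × Bool × Bool × Bool :=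
      (PySem.Set.contains w "Open Horizons, Unstable Ground",
       PySem.Set.contains w "Empowered but Exposed",
       PySem.Set.contains w "Seamless but Concentrated",
       PySem.Set.contains w "Transformed or Left Behind",
       PySem.Set.contains w "Guided but Fragile")
    -- _ANSWERS[bits]: every 5-tuple of booleans is a key of _ANSWERS, so the lookup
    -- never raises KeyError; the default of getD is never taken
    let out : PySem.Set String := PySem.Set.ofList ((PySem.Dict.get? answersD bits).getD [])
    if out = [] then none else some out

-- ===== PRECONDITION & SPEC =====
def Spec_compatible_archetypes_for_visions_union (visions : List String) (out : Option (List String)) : Prop := out = compatible_archetypes_for_visions_union_alt visions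
instance (visions : List String) (out : Option (List String)) : Decidable (Spec_compatible_archetypes_for_visions_union visions out) := by unfold Spec_compatible_archetypes_for_visions_union; infer_instance

-- ===== CLAIM (what is proved, stated in full; the proofs are below) =====
def Claim_equal_compatible_archetypes_for_visions_union : Prop := ∀ (visions : List String), Dom_compatible_archetypes_for_visions_union visions → Spec_compatible_archetypes_for_visions_union visions (compatible_archetypes_for_visions_union visions)

-- ===== LEMMAS AND PROOFS =====
theorem contains_ofList_eq (xs : List String) (s : String) :
    PySem.Set.contains (PySem.Set.ofList xs) s = xs.contains s := by
  simp [PySem.Set.mem_ofList]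

-- a left fold of inserts of f over a list: looking up any key of the list yields f of it
theorem get?_foldl_insert_fn {κ ν : Type} [BEq κ] [LawfulBEq κ] (f : κ → ν) :
    ∀ (l : List κ) (d : PySem.Dict κ ν) (k : κ),
      (k ∈ l ∨ PySem.Dict.get? d k = some (f k)) →
      PySem.Dict.get? (l.foldl (fun d x => PySem.Dict.insert d x (f x)) d) k = some (f k) := by
  intro l
  induction l with
  | nil =>
    intro d k h
    rcases h with h | h
    · exact absurd h (List.not_mem_nil)
    · simpa using h
  | cons x xs ih =>
    intro d k h
    simp only [List.foldl_cons]
    apply ih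
    by_cases hkx : k = x
    · subst hkx
      right
      simp [PySem.Dict.get?_insert_self]
    · rcases h with h | h
      · rcases List.mem_cons.mp h with h' | h'
        · exact absurd h' hkx
        · exact Or.inl h'
      · right
        rw [PySem.Dict.get?_insert_of_ne (hne := hkx)]
        exact h

-- every 5-tuple of booleans occurs in _BITS
theorem mem_bitsList (bits : Bool × Bool × Bool × Bool × Bool) : bits ∈ bitsList := by
  obtain ⟨b1, b2, b3, b4, b5⟩ := bits
  cases b1 <;> cases b2 <;> cases b3 <;> cases b4 <;> cases b5 <;> decide

-- the 32-entry dict lookup returns the (unevaluated) union for the requested bit tuple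
theorem get_answersD (bits : Bool × Bool × Bool × Bool × Bool) :
    PySem.Dict.get? answersD bits = some (unionFor bits) := by
  unfold answersD
  exact get?_foldl_insert_fn unionFor bitsList PySem.Dict.empty bits (Or.inl (mem_bitsList bits))

-- the union for any bit tuple is duplicate-free, so Python's set(...) copy is the identity
theorem nodup_unionFor (bits : Bool × Bool × Bool × Bool × Bool) : (unionFor bits).Nodup := by
  obtain ⟨b1, b2, b3, b4, b5⟩ := bits
  simp only [unionFor, visionArchs, List.map_cons, List.map_nil, List.zip_cons_cons,
    List.zip_nil_right, List.foldl_cons, List.foldl_nil]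
  split_ifs <;> repeat' first
    | exact List.nodup_nil
    | apply PySem.Set.nodup_update

-- set(_ANSWERS[bits]) copies a duplicate-free list: the identity on it
theorem ofList_unionFor (bits : Bool × Bool × Bool × Bool × Bool) :
    PySem.Set.ofList (unionFor bits) = unionFor bits :=
  PySem.Set.ofList_eq_self_of_nodup _ (nodup_unionFor bits)

-- each 4-row block of the table folds to a single conditional update
theorem fold_open (visions : List String) (out : PySem.Set String) :
    List.foldl (fun out p => if visions.contains p.1.1 then PySem.Set.add out p.2 else out) out
      [(("Open Horizons, Unstable Ground", "Opening"), "Pioneer"),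
       (("Open Horizons, Unstable Ground", "Mobilizing"), "Pioneer"),
       (("Open Horizons, Unstable Ground", "Normalizing"), "Pioneer"),
       (("Open Horizons, Unstable Ground", "Controlling"), "Guardian")]
    = if visions.contains "Open Horizons, Unstable Ground"
      then PySem.Set.update out ["Pioneer", "Guardian"] else out := by
  by_cases hb : ("Open Horizons, Unstable Ground" : String) ∈ visions <;>
    simp [hb, PySem.Set.update]

theorem fold_emp (visions : List String) (out : PySem.Set String) :
    List.foldl (fun out p => if visions.contains p.1.1 then PySem.Set.add out p.2 else out) out
      [(("Empowered but Exposed", "Opening"), "Pioneer"),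
       (("Empowered but Exposed", "Mobilizing"), "Builder"),
       (("Empowered but Exposed", "Normalizing"), "Guardian"),
       (("Empowered but Exposed", "Controlling"), "Guardian")]
    = if visions.contains "Empowered but Exposed"
      then PySem.Set.update out ["Pioneer", "Builder", "Guardian"] else out := by
  by_cases hb : ("Empowered but Exposed" : String) ∈ visions <;>
    simp [hb, PySem.Set.update]

theorem fold_seam (visions : List String) (out : PySem.Set String) :
    List.foldl (fun out p => if visions.contains p.1.1 then PySem.Set.add out p.2 else out) out
      [(("Seamless but Concentrated", "Opening"), "Pioneer"),
       (("Seamless but Concentrated", "Mobilizing"), "Builder"),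
       (("Seamless but Concentrated", "Normalizing"), "Pioneer"),
       (("Seamless but Concentrated", "Controlling"), "Guardian")]
    = if visions.contains "Seamless but Concentrated"
      then PySem.Set.update out ["Pioneer", "Builder", "Guardian"] else out := by
  by_cases hb : ("Seamless but Concentrated" : String) ∈ visions <;>
    simp [hb, PySem.Set.update]

theorem fold_trans (visions : List String) (out : PySem.Set String) :
    List.foldl (fun out p => if visions.contains p.1.1 then PySem.Set.add out p.2 else out) out
      [(("Transformed or Left Behind", "Opening"), "Pioneer"),
       (("Transformed or Left Behind", "Mobilizing"), "Builder"),
       (("Transformed or Left Behind", "Normalizing"), "Pioneer"),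
       (("Transformed or Left Behind", "Controlling"), "Guardian")]
    = if visions.contains "Transformed or Left Behind"
      then PySem.Set.update out ["Pioneer", "Builder", "Guardian"] else out := by
  by_cases hb : ("Transformed or Left Behind" : String) ∈ visions <;>
    simp [hb, PySem.Set.update]

theorem fold_guided (visions : List String) (out : PySem.Set String) :
    List.foldl (fun out p => if visions.contains p.1.1 then PySem.Set.add out p.2 else out) out
      [(("Guided but Fragile", "Opening"), "Pioneer"),
       (("Guided but Fragile", "Mobilizing"), "Guardian"),
       (("Guided but Fragile", "Normalizing"), "Guardian"),
       (("Guided but Fragile", "Controlling"), "Guardian")]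
    = if visions.contains "Guided but Fragile"
      then PySem.Set.update out ["Pioneer", "Guardian"] else out := by
  by_cases hb : ("Guided but Fragile" : String) ∈ visions <;>
    simp [hb, PySem.Set.update]

-- ===== VERDICT (by name: the statement is the Claim_ definition above) =====
theorem compatible_archetypes_for_visions_union_spec : Claim_equal_compatible_archetypes_for_visions_union := by
  intro visions _
  unfold Spec_compatible_archetypes_for_visions_union
  unfold compatible_archetypes_for_visions_union compatible_archetypes_for_visions_union_alt
  by_cases h0 : visions = []
  · simp [h0]
  · rw [if_neg h0, if_neg h0]
    simp only [contains_ofList_eq, get_answersD, Option.getD_some,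
      ofList_unionFor]
    rw [show v2aStanced =
        [(("Open Horizons, Unstable Ground", "Opening"), "Pioneer"),
         (("Open Horizons, Unstable Ground", "Mobilizing"), "Pioneer"),
         (("Open Horizons, Unstable Ground", "Normalizing"), "Pioneer"),
         (("Open Horizons, Unstable Ground", "Controlling"), "Guardian")] ++
        [(("Empowered but Exposed", "Opening"), "Pioneer"),
         (("Empowered but Exposed", "Mobilizing"), "Builder"),
         (("Empowered but Exposed", "Normalizing"), "Guardian"),
         (("Empowered but Exposed", "Controlling"), "Guardian")] ++
        [(("Seamless but Concentrated", "Opening"), "Pioneer"),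
         (("Seamless but Concentrated", "Mobilizing"), "Builder"),
         (("Seamless but Concentrated", "Normalizing"), "Pioneer"),
         (("Seamless but Concentrated", "Controlling"), "Guardian")] ++
        [(("Transformed or Left Behind", "Opening"), "Pioneer"),
         (("Transformed or Left Behind", "Mobilizing"), "Builder"),
         (("Transformed or Left Behind", "Normalizing"), "Pioneer"),
         (("Transformed or Left Behind", "Controlling"), "Guardian")] ++
        [(("Guided but Fragile", "Opening"), "Pioneer"),
         (("Guided but Fragile", "Mobilizing"), "Guardian"),
         (("Guided but Fragile", "Normalizing"), "Guardian"),
         (("Guided but Fragile", "Controlling"), "Guardian")] from rfl,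
      List.foldl_append, List.foldl_append, List.foldl_append, List.foldl_append,
      fold_open, fold_emp, fold_seam, fold_trans, fold_guided]
    simp only [unionFor, visionArchs, List.map_cons, List.map_nil, List.zip_cons_cons,
      List.zip_nil_right, List.foldl_cons, List.foldl_nil]
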